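-- pv_equiv track=rewrite | github.com/akashanup/programming | MaximumProductOfTwoElementsInAnArray/solution.py | maxProduct
-- ===== SOURCE A (Python) =====
-- from typing import List
--
-- def maxProduct(nums: List[int]) -> int:
--     largest = nums[0]
--     secondLargest = nums[1]
--     if secondLargest > largest:
--         largest, secondLargest = secondLargest, largest
--     for i in range(2, len(nums)):
--         num = nums[i]
--         if num > largest:
--             secondLargest = largest
--             largest = num
--         elif num > secondLargest:
--             secondLargest = num
--     return (largest-1) * (secondLargest-1)
-- ===== SOURCE B (Python) =====
-- from typing import List
--
-- def maxProduct(nums: List[int]) -> int: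
--     s = sorted(nums)
--     return (s[-1] - 1) * (s[-2] - 1)
-- ===== Notes on version B (the rewrite author's own statement) =====
-- stated objective: idiomatic
-- what changed: Replaces the single-pass running largest/second-largest scan with sorted(nums) followed by indexing the top two elements.
import Mathlib
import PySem

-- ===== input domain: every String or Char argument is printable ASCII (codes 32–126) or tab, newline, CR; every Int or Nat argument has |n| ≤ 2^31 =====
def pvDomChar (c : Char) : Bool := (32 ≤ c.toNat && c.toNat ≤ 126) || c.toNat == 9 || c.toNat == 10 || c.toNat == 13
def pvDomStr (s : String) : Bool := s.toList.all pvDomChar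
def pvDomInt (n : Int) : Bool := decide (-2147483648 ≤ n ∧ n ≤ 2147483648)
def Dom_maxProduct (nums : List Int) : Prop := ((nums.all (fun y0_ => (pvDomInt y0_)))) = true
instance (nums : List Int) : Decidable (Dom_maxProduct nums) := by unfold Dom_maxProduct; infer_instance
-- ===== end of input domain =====

-- B replaces A's single-pass largest/second-largest scan by sorting and indexing the top two; same results on lists of length ≥ 2 (A raises IndexError otherwise).


-- ===== PORT A =====
-- loop body of A: update (largest, secondLargest) with num
def pvStep (q : Int × Int) (num : Int) : Int × Int :=
  if num > q.1 then (num, q.1) else if num > q.2 then (q.1, num) else q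

def maxProduct (nums : List Int) : Int :=
  let largest := (PySem.List.pyGet? nums 0).getD 0       -- nums[0]; Pre_ rules out the IndexError
  let secondLargest := (PySem.List.pyGet? nums 1).getD 0 -- nums[1]; Pre_ rules out the IndexError
  let init := if secondLargest > largest then (secondLargest, largest) else (largest, secondLargest)
  let p := (PySem.List.pyRange 2 (PySem.List.len nums) 1).foldl
      (fun q i => pvStep q (PySem.List.pyGetD nums i 0)) init
  (p.1 - 1) * (p.2 - 1)

-- ===== PORT B =====
def maxProduct_alt (nums : List Int) : Int :=
  let s := PySem.List.sorted nums (fun x => x) false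
  ((PySem.List.pyGet? s (-1)).getD 0 - 1) * ((PySem.List.pyGet? s (-2)).getD 0 - 1)

-- ===== PRECONDITION & SPEC =====
-- A raises IndexError on lists of length < 2 (so does B); Pre_ excludes exactly those.
def Pre_maxProduct (nums : List Int) : Prop := 2 ≤ nums.length
instance (nums : List Int) : Decidable (Pre_maxProduct nums) := by unfold Pre_maxProduct; infer_instance
def pvWitness_maxProduct : List Int := [3, 1, 4, 1, 5]

def Spec_maxProduct (nums : List Int) (out : Int) : Prop := out = maxProduct_alt nums
instance (nums : List Int) (out : Int) : Decidable (Spec_maxProduct nums out) := by unfold Spec_maxProduct; infer_instance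

-- ===== CLAIM (what is proved, stated in full; the proofs are below) =====
def Claim_equal_maxProduct : Prop := ∀ (nums : List Int), Dom_maxProduct nums → Pre_maxProduct nums → Spec_maxProduct nums (maxProduct nums)

-- ===== LEMMAS AND PROOFS =====

-- pvStep is right-commutative: the scan state is permutation-invariant.
theorem pvStep_rcomm (q : Int × Int) (x y : Int) :
    pvStep (pvStep q x) y = pvStep (pvStep q y) x := by
  obtain ⟨a, b⟩ := q
  simp only [pvStep]
  split_ifs <;> simp_all <;> omega

-- starting from a sentinel below every domain value, the first two steps build A's initial state
theorem pvStep_bot (x y : Int) (hx : -2147483649 < x) (hy : -2147483649 < y) :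
    pvStep (pvStep ((-2147483649 : Int), (-2147483649 : Int)) x) y
      = if y > x then (y, x) else (x, y) := by
  simp only [pvStep]
  split_ifs <;> simp_all

-- folding pvStep over a sorted tail whose elements dominate the state yields the last two values
theorem pvStep_fold_sorted (t : List Int) : ∀ a b : Int, b ≤ a → (∀ z ∈ t, a ≤ z) →
    t.Pairwise (· ≤ ·) →
    t.foldl pvStep (a, b) = (t.getLastD a, ((a :: t).dropLast).getLastD b) := by
  induction t with
  | nil => intro a b _ _ _; rfl
  | cons z t ih =>
    intro a b hba hle hpw
    have hz : a ≤ z := hle z (by simp)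
    have hstep : pvStep (a, b) z = (z, a) := by
      simp only [pvStep]; split_ifs <;> simp_all <;> omega
    rw [List.foldl_cons, hstep,
      ih z a hz (fun w hw => (List.pairwise_cons.mp hpw).1 w hw) (List.pairwise_cons.mp hpw).2]
    cases t with
    | nil => rfl
    | cons u t' => simp only [List.getLastD_cons, List.dropLast_cons₂]

-- getLast? of a nonempty list in getLastD form (used to evaluate s[-1])
theorem getLast?_cons_getLastD (a : Int) (l : List Int) :
    (a :: l).getLast? = some (l.getLastD a) := by
  induction l generalizing a with
  | nil => rfl
  | cons b l ih => rw [List.getLast?_cons_cons, ih, List.getLastD_cons]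

-- the second-to-last element of u :: v :: w, as getElem?, equals a dropLast/getLastD form
theorem second_last_idx (w : List Int) : ∀ u v : Int,
    (u :: v :: w)[w.length]? = some (((v :: w).dropLast).getLastD u) := by
  induction w with
  | nil => intro u v; rfl
  | cons z w' ih =>
    intro u v
    rw [List.length_cons, List.getElem?_cons_succ, ih v z]
    cases w' with
    | nil => rfl
    | cons a l => simp only [List.getLastD_cons, List.dropLast_cons₂]

-- ===== VERDICT (by name: the statement is the Claim_ definition above) =====
theorem maxProduct_spec : Claim_equal_maxProduct := by
  intro nums hdom hpre
  unfold Spec_maxProduct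
  obtain ⟨x, y, t, rfl⟩ : ∃ x y t, nums = x :: y :: t := by
    match nums, hpre with
    | x :: y :: t, _ => exact ⟨x, y, t, rfl⟩
  have hbound : ∀ z ∈ (x :: y :: t), (-2147483649 : Int) < z := by
    intro z hz
    have := List.all_eq_true.mp hdom z hz
    simp only [pvDomInt, decide_eq_true_eq] at this
    omega
  have h0 : PySem.List.pyGet? (x :: y :: t) 0 = some x := PySem.List.pyGet?_zero_cons _ _
  have h1 : PySem.List.pyGet? (x :: y :: t) 1 = some y := by
    rw [show (1 : Int) = ((1 : Nat) : Int) by norm_num, PySem.List.pyGet?_natCast]; rfl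
  -- A's computation as a single fold from the sentinel state over the whole list
  have hA : maxProduct (x :: y :: t)
      = (let p := (x :: y :: t).foldl pvStep ((-2147483649 : Int), (-2147483649 : Int));
         (p.1 - 1) * (p.2 - 1)) := by
    simp only [maxProduct]
    rw [PySem.List.foldl_pyRange_pyGetD (x :: y :: t) (0 : Int) pvStep
      (if (PySem.List.pyGet? (x :: y :: t) 1).getD 0 > (PySem.List.pyGet? (x :: y :: t) 0).getD 0
        then ((PySem.List.pyGet? (x :: y :: t) 1).getD 0, (PySem.List.pyGet? (x :: y :: t) 0).getD 0)
        else ((PySem.List.pyGet? (x :: y :: t) 0).getD 0, (PySem.List.pyGet? (x :: y :: t) 1).getD 0))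
      (by omega)]
    rw [h0, h1]
    simp only [Option.getD_some]
    rw [show List.drop (Int.toNat 2) (x :: y :: t) = t from rfl]
    simp only [List.foldl_cons]
    rw [pvStep_bot x y (hbound x (by simp)) (hbound y (by simp))]
  rw [hA]
  -- replace the fold over nums by the fold over sorted nums
  have hperm : (PySem.List.sorted (x :: y :: t) (fun x => x) false).Perm (x :: y :: t) :=
    PySem.List.sorted_perm _ _ _
  rw [List.Perm.foldl_eq' hperm.symm
    (fun p _ q _ z => pvStep_rcomm z p q) ((-2147483649 : Int), (-2147483649 : Int))]
  -- the sorted list has length ≥ 2, so it is u :: v :: w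
  obtain ⟨u, v, w, hs⟩ : ∃ u v w,
      PySem.List.sorted (x :: y :: t) (fun x => x) false = u :: v :: w := by
    have hlen : (PySem.List.sorted (x :: y :: t) (fun x => x) false).length = t.length + 2 := by
      rw [hperm.length_eq]; simp
    match h : PySem.List.sorted (x :: y :: t) (fun x => x) false, hlen with
    | u :: v :: w, _ => exact ⟨u, v, w, rfl⟩
  have hpw : (u :: v :: w).Pairwise (fun a b : Int => a ≤ b) := by
    have := PySem.List.sorted_pairwise (xs := x :: y :: t) (key := fun x : Int => x)
    rw [hs] at this; exact this
  have hmem : ∀ z ∈ (u :: v :: w), (-2147483649 : Int) < z := by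
    intro z hz
    exact hbound z (hperm.mem_iff.mp (hs ▸ hz))
  have huv : u ≤ v := (List.pairwise_cons.mp hpw).1 v (by simp)
  -- evaluate the fold over the sorted list
  have hfold : (u :: v :: w).foldl pvStep ((-2147483649 : Int), (-2147483649 : Int))
      = (w.getLastD v, ((v :: w).dropLast).getLastD u) := by
    simp only [List.foldl_cons]
    rw [pvStep_bot u v (hmem u (by simp)) (hmem v (by simp))]
    have hinit : (if v > u then ((v : Int), (u : Int)) else (u, v)) = ((v : Int), (u : Int)) := by
      split_ifs <;> simp_all
      omega
    rw [hinit, pvStep_fold_sorted w v u huv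
      (fun z hz => (List.pairwise_cons.mp (List.pairwise_cons.mp hpw).2).1 z hz)
      (List.pairwise_cons.mp (List.pairwise_cons.mp hpw).2).2]
  -- evaluate B's two negative indexings on u :: v :: w
  have hneg1 : PySem.List.pyGet? (u :: v :: w) (-1) = some (w.getLastD v) := by
    rw [PySem.List.pyGet?_neg_one, getLast?_cons_getLastD, List.getLastD_cons]
  have hneg2 : PySem.List.pyGet? (u :: v :: w) (-2) = some (((v :: w).dropLast).getLastD u) := by
    have h2 : PySem.List.pyGet? (u :: v :: w) (-((2 : Nat) : Int))
        = (u :: v :: w)[(u :: v :: w).length - 2]? :=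
      PySem.List.pyGet?_neg_natCast (u :: v :: w) 2 (by omega) (by simp)
    rw [show (-2 : Int) = -((2 : Nat) : Int) by norm_num, h2]
    simpa using second_last_idx w u v
  simp only [maxProduct_alt, hs, hfold, hneg1, hneg2, Option.getD_some]
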